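-- pv_equiv track=rewrite | github.com/tkiet79/Coding_Practice | GeeksForGeeks/geeksforgeeks_Swap the array elements.py | swapElements
-- ===== SOURCE A (Python) =====
-- def swapElements(arr):
--     left = 0
--     right = 2
--     n = len(arr)
--     if n < 3:
--         return arr
--
--     while right < n:
--         arr[left], arr[right] = arr[right], arr[left]
--         left += 1
--         right += 1
--
--     return arr
-- ===== SOURCE B (Python) =====
-- def swapElements(arr):
--     # Closed form: the chain of overlapping swaps rotates the list left by 2,
--     # with the two carried front elements landing in parity-dependent order.
--     # Mutates arr in place (like A) and returns the same object.
--     n = len(arr)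
--     if n < 3:
--         return arr
--     tail = [arr[0], arr[1]] if n % 2 == 0 else [arr[1], arr[0]]
--     arr[:] = arr[2:] + tail
--     return arr
-- ===== Notes on version B (the rewrite author's own statement) =====
-- stated objective: faster
-- what changed: Replaces the element-by-element overlapping swap loop with a closed-form slice: the loop's net effect is a left rotation by 2 with the two front elements appended in parity-dependent order.
import Mathlib
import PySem

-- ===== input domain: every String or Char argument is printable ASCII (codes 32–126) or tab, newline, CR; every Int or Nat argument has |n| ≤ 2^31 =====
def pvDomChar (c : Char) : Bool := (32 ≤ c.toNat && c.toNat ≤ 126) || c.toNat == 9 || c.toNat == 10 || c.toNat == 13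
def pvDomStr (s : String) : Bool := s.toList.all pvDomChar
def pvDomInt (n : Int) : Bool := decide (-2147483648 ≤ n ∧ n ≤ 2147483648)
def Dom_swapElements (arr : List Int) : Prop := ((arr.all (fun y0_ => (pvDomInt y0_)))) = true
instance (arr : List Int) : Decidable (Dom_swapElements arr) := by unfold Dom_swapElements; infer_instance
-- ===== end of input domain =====

-- B replaces A's overlapping swap loop by a closed-form slice (left rotation by 2 with a
-- parity-ordered tail); both mutate the list in place in Python — equivalence here is about the return value.

-- ===== PORT A =====
-- the while-loop: swap arr[left], arr[right], advance both, while right < n (n fixed)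
def swapLoopA (n : Nat) (arr : List Int) (left right : Nat) : List Int :=
  if right < n then
    swapLoopA n ((arr.set left (arr.getD right 0)).set right (arr.getD left 0))
      (left + 1) (right + 1)
  else arr
termination_by n - right

def swapElements (arr : List Int) : List Int :=
  let n := arr.length
  if n < 3 then arr
  else swapLoopA n arr 0 2

-- ===== PORT B =====
def swapElements_alt (arr : List Int) : List Int :=
  let n := arr.length
  if n < 3 then arr
  else
    let tail := if n % 2 == 0 then [arr.getD 0 0, arr.getD 1 0] else [arr.getD 1 0, arr.getD 0 0]
    PySem.List.slice arr (some 2) none ++ tail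

-- ===== PRECONDITION & SPEC =====
def Spec_swapElements (arr : List Int) (out : List Int) : Prop := out = swapElements_alt arr
instance (arr : List Int) (out : List Int) : Decidable (Spec_swapElements arr out) := by unfold Spec_swapElements; infer_instance

-- ===== CLAIM (what is proved, stated in full; the proofs are below) =====
def Claim_equal_swapElements : Prop := ∀ (arr : List Int), Dom_swapElements arr → Spec_swapElements arr (swapElements arr)

-- ===== LEMMAS AND PROOFS =====

-- one iteration of the loop on a list split as A ++ a :: b :: c :: B at left = A.length
lemma swapLoopA_step (A B : List Int) (a b c : Int) :
    ((A ++ a :: b :: c :: B).set A.length c).set (A.length + 2) a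
      = A ++ c :: b :: a :: B := by
  have h1 : (A ++ a :: b :: c :: B).set A.length c = A ++ c :: b :: c :: B := by
    rw [List.set_append_right _ _ (le_refl _)]
    simp
  rw [h1, List.set_append_right _ _ (by omega)]
  have : A.length + 2 - A.length = 2 := by omega
  simp [this]

lemma getD_mid (A B : List Int) (x : Int) (rest : List Int) :
    (A ++ x :: rest ++ B).getD A.length 0 = x := by
  simp [List.getD]

-- loop invariant: starting from A ++ a :: b :: B with left = A.length, right = left + 2
lemma swapLoopA_inv (B A : List Int) (a b : Int) :
    swapLoopA (A.length + 2 + B.length) (A ++ a :: b :: B) A.length (A.length + 2)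
      = A ++ B ++ (if B.length % 2 == 0 then [a, b] else [b, a]) := by
  induction B generalizing A a b with
  | nil =>
      rw [swapLoopA]
      simp
  | cons c B' ih =>
      rw [swapLoopA]
      have hlt : A.length + 2 < A.length + 2 + (c :: B').length := by simp
      rw [if_pos hlt]
      have hg1 : (A ++ a :: b :: c :: B').getD (A.length + 2) 0 = c := by
        have h := getD_mid (A ++ [a, b]) B' c []
        simp only [List.length_append, List.length_cons, List.length_nil, List.append_assoc, List.cons_append, List.nil_append] at h
        simpa using h
      have hg2 : (A ++ a :: b :: c :: B').getD A.length 0 = a := by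
        simpa using getD_mid A B' a [b, c]
      rw [hg1, hg2, swapLoopA_step]
      have key := ih (A ++ [c]) b a
      simp only [List.length_append, List.length_cons, List.length_nil] at key
      rw [show A.length + 2 + (c :: B').length = A.length + 1 + 2 + B'.length from by
            simp only [List.length_cons]; omega,
          show A.length + 2 + 1 = A.length + 1 + 2 from by omega,
          show A ++ c :: b :: a :: B' = (A ++ [c]) ++ b :: a :: B' from by simp]
      rw [key]
      have hpar : ((c :: B').length % 2 == 0) = !(B'.length % 2 == 0) := by
        simp only [List.length_cons]
        cases hB : B'.length % 2 == 0 <;> simp_all <;> omega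
      rw [hpar]
      cases hB : (B'.length % 2 == 0) <;> simp

-- ===== VERDICT (by name: the statement is the Claim_ definition above) =====
theorem swapElements_spec : Claim_equal_swapElements := by
  intro arr _
  unfold Spec_swapElements swapElements swapElements_alt
  by_cases h : arr.length < 3
  · simp [h]
  · rw [if_neg h, if_neg h]
    obtain _ | ⟨a, _ | ⟨b, rest⟩⟩ := arr
    · exact absurd (by simp) h
    · exact absurd (by simp) h
    · have key := swapLoopA_inv rest [] a b
      simp only [List.length_nil, List.nil_append, Nat.zero_add] at key
      rw [show (a :: b :: rest).length = 0 + 2 + rest.length from by simp; omega] at *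
      rw [key]
      have hsl : PySem.List.slice (a :: b :: rest) (some 2) none = rest := by
        rw [show (2 : Int) = ((2 : Nat) : Int) from by norm_num,
            PySem.List.slice_from_natCast]
        rfl
      rw [hsl]
      have hpar : ((0 + 2 + rest.length) % 2 == 0) = (rest.length % 2 == 0) := by
        simp
      rw [hpar]
      cases hb : (rest.length % 2 == 0) <;> simp
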